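-- pv_equiv track=rewrite | github.com/soysoj/Advanced_Flex_Travel | implement/evaluate.py | filter_dataset_by_condition
-- ===== SOURCE A (Python) =====
-- def filter_dataset_by_condition(dataset, condition):
--     """Filter dataset based on constraint condition."""
--     new_dataset = []
--
--     if condition == 'global_local':
--         new_dataset = [data for data in dataset if data['new_constraints'][0].get('budget') and data['new_constraints'][1].get('room type')]
--         new_dataset += [data for data in dataset if data['new_constraints'][0].get('budget') and data['new_constraints'][1].get('house rule')]
--         new_dataset += [data for data in dataset if data['new_constraints'][0].get('budget') and data['new_constraints'][1].get('cuisine')]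
--     elif condition == 'local_global':
--         new_dataset = [data for data in dataset if data['new_constraints'][0].get('room type') and data['new_constraints'][1].get('budget')]
--         new_dataset += [data for data in dataset if data['new_constraints'][0].get('house rule') and data['new_constraints'][1].get('budget')]
--         new_dataset += [data for data in dataset if data['new_constraints'][0].get('cuisine') and data['new_constraints'][1].get('budget')]
--     else:
--         # For custom constraint pairs, parse the condition
--         parts = condition.split('_')
--         if len(parts) == 2:
--             first, second = parts
--             new_dataset = [data for data in dataset if
--                           (data['new_constraints'][0].get(first) and data['new_constraints'][1].get(second))]
--
--     return new_dataset
-- ===== SOURCE B (Python) =====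
-- def filter_dataset_by_condition(dataset, condition):
--     """Filter dataset based on constraint condition.
--
--     Single pass: one traversal of the dataset routing each record into
--     per-pair buckets, concatenated at the end (A rescans the dataset once
--     per key pair)."""
--     if condition == 'global_local':
--         pairs = [('budget', 'room type'), ('budget', 'house rule'), ('budget', 'cuisine')]
--     elif condition == 'local_global':
--         pairs = [('room type', 'budget'), ('house rule', 'budget'), ('cuisine', 'budget')]
--     else:
--         parts = condition.split('_')
--         if len(parts) != 2:
--             return []
--         pairs = [(parts[0], parts[1])]
--     buckets = [[] for _ in pairs]
--     for data in dataset: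
--         constraints = data['new_constraints']
--         for bucket, (first, second) in zip(buckets, pairs):
--             if constraints[0].get(first) and constraints[1].get(second):
--                 bucket.append(data)
--     result = []
--     for bucket in buckets:
--         result += bucket
--     return result
-- ===== Notes on version B (the rewrite author's own statement) =====
-- stated objective: alternative
-- what changed: Replaces A's up-to-three separate filter passes over the dataset with a single traversal that routes each record into per-pair buckets (table-driven), concatenated at the end.
import Mathlib
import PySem

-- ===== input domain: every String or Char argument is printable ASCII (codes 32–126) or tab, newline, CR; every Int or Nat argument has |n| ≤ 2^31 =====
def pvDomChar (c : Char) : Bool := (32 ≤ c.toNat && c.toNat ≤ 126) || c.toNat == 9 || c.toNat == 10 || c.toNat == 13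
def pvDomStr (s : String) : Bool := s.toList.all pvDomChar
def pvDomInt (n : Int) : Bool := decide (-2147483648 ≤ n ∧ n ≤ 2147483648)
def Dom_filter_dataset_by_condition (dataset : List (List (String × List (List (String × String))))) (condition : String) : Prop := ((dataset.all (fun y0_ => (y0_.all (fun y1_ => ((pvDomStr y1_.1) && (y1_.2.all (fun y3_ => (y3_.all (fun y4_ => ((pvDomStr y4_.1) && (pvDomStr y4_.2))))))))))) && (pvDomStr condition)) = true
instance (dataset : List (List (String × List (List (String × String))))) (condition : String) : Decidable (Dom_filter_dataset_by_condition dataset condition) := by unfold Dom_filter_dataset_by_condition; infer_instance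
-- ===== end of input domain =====

-- ===== PORT A =====
-- B replaces A's up-to-three separate filter passes by a single traversal of the
-- dataset routing each record into per-pair buckets (objective: alternative).
-- A-side helper: the comprehension condition
--   data['new_constraints'][0].get(first) and data['new_constraints'][1].get(second)
-- (none = the Python raised there; those inputs are excluded by Pre_, see below).
def pvKeepA (data : List (String × List (List (String × String)))) (first second : String) : Bool :=
  match (PySem.Dict.mk data).get? "new_constraints" with
  | none => false   -- KeyError: excluded by Pre_
  | some nc =>
    match PySem.List.pyGet? nc 0 with
    | none => false -- IndexError: excluded by Pre_
    | some d0 =>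
      match (PySem.Dict.mk d0).get? first with
      | none => false
      | some v0 =>
        if v0 = "" then false
        else
          match PySem.List.pyGet? nc 1 with
          | none => false -- IndexError: excluded by Pre_
          | some d1 =>
            match (PySem.Dict.mk d1).get? second with
            | none => false
            | some v1 => v1 ≠ ""

def filter_dataset_by_condition (dataset : List (List (String × List (List (String × String))))) (condition : String) : List (List (String × List (List (String × String)))) :=
  if condition = "global_local" then
    (dataset.filter (fun data => pvKeepA data "budget" "room type"))
      ++ (dataset.filter (fun data => pvKeepA data "budget" "house rule"))
      ++ (dataset.filter (fun data => pvKeepA data "budget" "cuisine"))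
  else if condition = "local_global" then
    (dataset.filter (fun data => pvKeepA data "room type" "budget"))
      ++ (dataset.filter (fun data => pvKeepA data "house rule" "budget"))
      ++ (dataset.filter (fun data => pvKeepA data "cuisine" "budget"))
  else
    match PySem.Str.split? condition "_" with
    | none => []   -- unreachable: split? is none only for sep = "", the sep here is "_"
    | some parts =>
      match parts with
      | first :: second :: [] => dataset.filter (fun data => pvKeepA data first second)
      | _ => []

-- ===== PORT B =====
-- B-side helper: the same comprehension condition, written as an Option chain
-- (each bind is none exactly where the Python B raised or fell to a falsy value).
def pvKeepB (data : List (String × List (List (String × String)))) (first second : String) : Bool :=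
  ((do
    let nc ← (PySem.Dict.mk data).get? "new_constraints"
    let d0 ← PySem.List.pyGet? nc 0
    let v0 ← (PySem.Dict.mk d0).get? first
    let d1 ← PySem.List.pyGet? nc 1
    let v1 ← (PySem.Dict.mk d1).get? second
    pure (v0 ≠ "" && v1 ≠ "")) : Option Bool).getD false

-- the (first, second) key-pair table of Source B (none = the early 'return []')
def pvPairsFor (condition : String) : Option (List (String × String)) :=
  if condition = "global_local" then
    some [("budget", "room type"), ("budget", "house rule"), ("budget", "cuisine")]
  else if condition = "local_global" then
    some [("room type", "budget"), ("house rule", "budget"), ("cuisine", "budget")]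
  else
    -- parts = condition.split('_'); split? is none only for sep = "", the sep here is "_"
    let parts := (PySem.Str.split? condition "_").getD []
    if parts.length = 2 then
      -- parts[0], parts[1]: in range because len(parts) == 2, so getD is never taken
      some [((PySem.List.pyGet? parts 0).getD "", (PySem.List.pyGet? parts 1).getD "")]
    else none

def filter_dataset_by_condition_alt (dataset : List (List (String × List (List (String × String))))) (condition : String) : List (List (String × List (List (String × String)))) :=
  match pvPairsFor condition with
  | none => []
  | some pairs =>
    -- one pass over the dataset: route each record into the buckets of the pairs it matches
    let buckets := dataset.foldl
      (fun buckets data =>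
        (buckets.zip pairs).map
          (fun bp => if pvKeepB data bp.2.1 bp.2.2 then bp.1 ++ [data] else bp.1))
      (pairs.map (fun _ => []))
    buckets.foldl (· ++ ·) []

-- ===== PRECONDITION & SPEC =====
-- ok for one first-key: no KeyError/IndexError while evaluating the comprehension condition on this record
def pvOkData (data : List (String × List (List (String × String)))) (first : String) : Bool :=
  match (PySem.Dict.mk data).get? "new_constraints" with
  | none => false
  | some [] => false
  | some (d0 :: rest) =>
      (match (PySem.Dict.mk d0).get? first with
       | some v0 => v0 = "" || !rest.isEmpty
       | none => true)

-- the first-position keys the reached branch looks up (truthiness there decides whether [1] is indexed)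
def pvFirstKeys (condition : String) : List String :=
  if condition = "global_local" then ["budget"]
  else if condition = "local_global" then ["room type", "house rule", "cuisine"]
  else
    match PySem.Str.split? condition "_" with
    | none => []
    | some parts => if parts.length = 2 then [parts.headD ""] else []

-- Exactly the inputs on which A returns: no record lacking a 'new_constraints' list of the needed length is reached (else KeyError/IndexError).
def Pre_filter_dataset_by_condition (dataset : List (List (String × List (List (String × String))))) (condition : String) : Prop :=
  ∀ data ∈ dataset, ∀ f ∈ pvFirstKeys condition, pvOkData data f = true
instance (dataset : List (List (String × List (List (String × String))))) (condition : String) : Decidable (Pre_filter_dataset_by_condition dataset condition) := by unfold Pre_filter_dataset_by_condition; infer_instance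

def pvWitness_filter_dataset_by_condition : (List (List (String × List (List (String × String))))) × String :=
  ([[("new_constraints", [[("budget", "500")], [("room type", "suite")]])]], "global_local")

def Spec_filter_dataset_by_condition (dataset : List (List (String × List (List (String × String))))) (condition : String) (out : List (List (String × List (List (String × String))))) : Prop := out = filter_dataset_by_condition_alt dataset condition
instance (dataset : List (List (String × List (List (String × String))))) (condition : String) (out : List (List (String × List (List (String × String))))) : Decidable (Spec_filter_dataset_by_condition dataset condition out) := by unfold Spec_filter_dataset_by_condition; infer_instance

-- ===== CLAIM (what is proved, stated in full; the proofs are below) =====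
def Claim_equal_filter_dataset_by_condition : Prop := ∀ (dataset : List (List (String × List (List (String × String))))) (condition : String), Dom_filter_dataset_by_condition dataset condition → Pre_filter_dataset_by_condition dataset condition → Spec_filter_dataset_by_condition dataset condition (filter_dataset_by_condition dataset condition)

-- ===== LEMMAS AND PROOFS =====
-- the two comprehension conditions agree on every record
theorem pvKeep_eq (data : List (String × List (List (String × String)))) (first second : String) :
    pvKeepA data first second = pvKeepB data first second := by
  unfold pvKeepA pvKeepB
  cases h1 : (PySem.Dict.mk data).get? "new_constraints" with
  | none => simp
  | some nc =>
    cases h2 : PySem.List.pyGet? nc 0 with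
    | none => simp [h2]
    | some d0 =>
      cases h3 : (PySem.Dict.mk d0).get? first with
      | none => simp [h2, h3]
      | some v0 =>
        by_cases h4 : v0 = "" <;>
        cases h5 : PySem.List.pyGet? nc 1 with
        | none => simp [h2, h3, h4, h5]
        | some d1 =>
          cases h6 : (PySem.Dict.mk d1).get? second <;> simp [h2, h3, h4, h5, h6]

-- the bucket fold over the dataset computes, per pair, an appended filter pass
theorem pvBuckets_eq {α : Type} (keep : α → String → String → Bool) :
    ∀ (ds : List α) (pairs : List (String × String)) (init : String × String → List α),
      ds.foldl
        (fun buckets data =>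
          (buckets.zip pairs).map
            (fun bp => if keep data bp.2.1 bp.2.2 then bp.1 ++ [data] else bp.1))
        (pairs.map init)
      = pairs.map (fun p => init p ++ ds.filter (fun d => keep d p.1 p.2)) := by
  intro ds
  induction ds with
  | nil => intro pairs init; simp
  | cons d ds ih =>
    intro pairs init
    have hzip : (pairs.map init).zip pairs = pairs.map (fun p => (init p, p)) := by
      induction pairs with
      | nil => simp
      | cons p ps ihp => simp [ihp]
    have hstep :
        ((pairs.map init).zip pairs).map
            (fun bp => if keep d bp.2.1 bp.2.2 then bp.1 ++ [d] else bp.1)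
          = pairs.map (fun p => if keep d p.1 p.2 then init p ++ [d] else init p) := by
      rw [hzip, List.map_map]; rfl
    simp only [List.foldl_cons, hstep, ih]
    apply List.map_congr_left
    intro p _
    by_cases h : keep d p.1 p.2 = true <;> simp [h]

-- ===== VERDICT (by name: the statement is the Claim_ definition above) =====
theorem filter_dataset_by_condition_spec : Claim_equal_filter_dataset_by_condition := by
  intro dataset condition _ _
  unfold Spec_filter_dataset_by_condition filter_dataset_by_condition filter_dataset_by_condition_alt pvPairsFor
  by_cases h1 : condition = "global_local"
  · have h := pvBuckets_eq pvKeepB dataset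
      [("budget", "room type"), ("budget", "house rule"), ("budget", "cuisine")] (fun _ => [])
    simp only [List.map_cons, List.map_nil, List.nil_append] at h
    simp [h1, h, pvKeep_eq]
  · by_cases h2 : condition = "local_global"
    · have h := pvBuckets_eq pvKeepB dataset
        [("room type", "budget"), ("house rule", "budget"), ("cuisine", "budget")] (fun _ => [])
      simp only [List.map_cons, List.map_nil, List.nil_append] at h
      simp [h2, h, pvKeep_eq, List.append_assoc]
    · simp only [h1, h2, if_false]
      cases h3 : PySem.Str.split? condition "_" with
      | none => rfl
      | some parts =>
        cases parts with
        | nil => rfl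
        | cons a t =>
          cases t with
          | nil => rfl
          | cons b t2 =>
            cases t2 with
            | nil =>
              have h := pvBuckets_eq pvKeepB dataset [(a, b)] (fun _ => [])
              simp only [List.map_cons, List.map_nil, List.nil_append] at h
              simp [h, pvKeep_eq]
            | cons c t3 => rfl
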